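-- pv_equiv track=rewrite | github.com/shantilabs/django-public-id | public_id/fields.py | get_minimal_length
-- ===== SOURCE A (Python) =====
-- def get_minimal_length(chars):
--     """
--     Return the length of string that can store 128 bits of information
--     """
--     alphabet_length = len(set(chars))
--     assert alphabet_length >= 2
--
--     variants_threshold = 2**128
--     variants = 1
--
--     result = 0
--
--     while variants < variants_threshold:
--         variants *= alphabet_length
--         result += 1
--
--     return result
-- ===== SOURCE B (Python) =====
-- def get_minimal_length(chars):
--     """
--     Return the length of string that can store 128 bits of information
--     """
--     alphabet_length = len(set(chars))
--     assert alphabet_length >= 2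
--
--     # The least n with alphabet_length**n >= 2**128 is exactly the number of
--     # digits of 2**128 - 1 written in base alphabet_length, computed by
--     # recursive floor division (no growing product is ever built).
--     def digits(m):
--         if m == 0:
--             return 0
--         return 1 + digits(m // alphabet_length)
--
--     return digits(2 ** 128 - 1)
-- ===== Notes on version B (the rewrite author's own statement) =====
-- stated objective: alternative
-- what changed: Replaces A's count-up loop that multiplies a growing product until it reaches 2**128 by a recursive digit count: the answer equals the number of base-k digits of 2**128-1, obtained by repeated floor division down to zero; Pre_ excludes strings with fewer than 2 distinct characters, where A's assert raises.
import Mathlib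
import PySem

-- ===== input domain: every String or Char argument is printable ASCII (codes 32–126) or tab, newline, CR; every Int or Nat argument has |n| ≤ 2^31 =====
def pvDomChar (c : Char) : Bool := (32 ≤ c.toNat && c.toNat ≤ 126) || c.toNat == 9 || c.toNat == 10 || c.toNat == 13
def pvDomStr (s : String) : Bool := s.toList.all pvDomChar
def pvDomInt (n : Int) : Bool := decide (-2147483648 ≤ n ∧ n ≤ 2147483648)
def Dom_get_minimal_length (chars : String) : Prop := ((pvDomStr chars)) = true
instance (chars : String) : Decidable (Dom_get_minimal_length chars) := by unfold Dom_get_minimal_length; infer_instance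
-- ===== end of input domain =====

-- B replaces A's count-up multiplication loop by a recursive digit count of 2^128-1 in base k; same results on Pre_.

-- ===== PORT A =====
-- A's while loop: 'while variants < 2**128: variants *= k; result += 1'.
-- Fuel only makes the recursion total; 129 steps always suffice when k ≥ 2 (Pre_), so on Pre_ it is the same computation.
def pvAloop : Nat → Int → Int → Int → Int
  | 0, _, _, result => result
  | fuel + 1, k, variants, result =>
    if variants < 2 ^ 128 then pvAloop fuel k (variants * k) (result + 1) else result

def get_minimal_length (chars : String) : Int :=
  let alphabet_length : Int := (PySem.Set.ofList chars.toList).length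
  pvAloop 129 alphabet_length 1 0

-- ===== PORT B =====
-- B's recursive helper 'digits(m): 0 if m == 0 else 1 + digits(m // k)'.
-- m and k are nonnegative throughout, so Python's '//' coincides with Nat division; fuel
-- (129 suffices for m < 2^129 when k ≥ 2, Pre_) only makes the recursion total.
def pvBdigits : Nat → Nat → Nat → Int
  | 0, _, _ => 0
  | fuel + 1, k, m =>
    if m = 0 then 0 else 1 + pvBdigits fuel k (m / k)

def get_minimal_length_alt (chars : String) : Int :=
  let alphabet_length : Nat := (PySem.Set.ofList chars.toList).length
  pvBdigits 129 alphabet_length (2 ^ 128 - 1)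

-- ===== PRECONDITION & SPEC =====
-- Pre_ excludes exactly the strings with fewer than 2 distinct characters, on which A's assert raises AssertionError.
def Pre_get_minimal_length (chars : String) : Prop :=
  2 ≤ (PySem.Set.ofList chars.toList).length
instance (chars : String) : Decidable (Pre_get_minimal_length chars) := by
  unfold Pre_get_minimal_length; infer_instance

def pvWitness_get_minimal_length : String := "ab"

def Spec_get_minimal_length (chars : String) (out : Int) : Prop := out = get_minimal_length_alt chars
instance (chars : String) (out : Int) : Decidable (Spec_get_minimal_length chars out) := by
  unfold Spec_get_minimal_length; infer_instance

-- ===== CLAIM (what is proved, stated in full; the proofs are below) =====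
def Claim_equal_get_minimal_length : Prop := ∀ (chars : String), Dom_get_minimal_length chars → Pre_get_minimal_length chars → Spec_get_minimal_length chars (get_minimal_length chars)

-- ===== LEMMAS AND PROOFS =====

-- Both ports depend on the input only through k = number of distinct characters; on Dom, k ≤ 127,
-- so the agreement of the two computations is a finite check over 2 ≤ k < 128.
set_option maxRecDepth 40000 in
theorem pv_loops_agree : ∀ k : Nat, k < 128 → 2 ≤ k →
    pvAloop 129 (k : Int) 1 0 = pvBdigits 129 k (2 ^ 128 - 1) := by
  decide

theorem pv_toNat_injective : Function.Injective Char.toNat := by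
  intro a b h
  exact Char.ext (UInt32.toNat_inj.mp h)

theorem pv_distinct_le (chars : String) (h : Dom_get_minimal_length chars) :
    (PySem.Set.ofList chars.toList).length < 128 := by
  have hnd : (PySem.Set.ofList chars.toList).Nodup := PySem.Set.nodup_ofList _
  have hmap : ((PySem.Set.ofList chars.toList).map Char.toNat).Nodup :=
    hnd.map pv_toNat_injective
  have hsub : ((PySem.Set.ofList chars.toList).map Char.toNat) ⊆ List.range 127 := by
    intro n hn
    simp only [List.mem_map] at hn
    obtain ⟨c, hc, rfl⟩ := hn
    have hc' : c ∈ chars.toList := (PySem.Set.mem_ofList _ _).1 hc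
    have : pvDomChar c = true := by
      have := (List.all_eq_true.1 h) c hc'
      exact this
    simp only [pvDomChar, Bool.or_eq_true, Bool.and_eq_true, decide_eq_true_eq, beq_iff_eq] at this
    simp only [List.mem_range]
    omega
  have := (List.subperm_of_subset hmap hsub).length_le
  rw [List.length_map] at this
  simp only [List.length_range] at this
  omega

-- ===== VERDICT (by name: the statement is the Claim_ definition above) =====
theorem get_minimal_length_spec : Claim_equal_get_minimal_length := by
  intro chars hdom hpre
  unfold Spec_get_minimal_length get_minimal_length get_minimal_length_alt
  have hlt := pv_distinct_le chars hdom
  have h2 : 2 ≤ (PySem.Set.ofList chars.toList).length := hpre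
  simpa using pv_loops_agree _ hlt h2
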